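-- pv_equiv track=rewrite | github.com/lymchgmk/Algorithm-Problem-Solving | Programmers/연습문제/Level 2/덧칠하기/Solution.py | solution
-- ===== SOURCE A (Python) =====
-- from collections import deque
--
-- def solution(n, m, section):
--     deq = deque(section)
--     count = 0
--
--     while deq:
--         curr = deq.popleft()
--         count += 1
--
--         while deq and deq[0] < curr + m:
--             deq.popleft()
--
--     return count
-- ===== SOURCE B (Python) =====
-- def solution(n, m, section):
--     count = 0
--     painted = None  # left end of un-painted area; None = nothing painted yet
--     for x in section:
--         if painted is None or x >= painted:
--             count += 1
--             painted = x + m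
--     return count
-- ===== Notes on version B (the rewrite author's own statement) =====
-- stated objective: simpler
-- what changed: Replaced the deque with its destructive popleft outer loop and inner drain loop by a single flat for-pass carrying a scalar 'painted' boundary and a counter (no deque allocation/popleft calls).
import Mathlib
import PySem

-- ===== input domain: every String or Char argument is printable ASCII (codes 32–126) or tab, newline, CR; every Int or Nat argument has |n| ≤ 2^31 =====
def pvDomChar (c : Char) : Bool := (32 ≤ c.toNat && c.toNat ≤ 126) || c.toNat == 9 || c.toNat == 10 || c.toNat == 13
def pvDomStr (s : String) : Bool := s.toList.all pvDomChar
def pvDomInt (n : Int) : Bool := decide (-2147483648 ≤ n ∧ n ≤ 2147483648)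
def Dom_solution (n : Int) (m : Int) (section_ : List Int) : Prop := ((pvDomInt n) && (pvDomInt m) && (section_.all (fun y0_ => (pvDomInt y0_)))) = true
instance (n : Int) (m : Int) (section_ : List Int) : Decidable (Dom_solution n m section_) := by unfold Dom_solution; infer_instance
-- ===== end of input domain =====

-- B replaces A's deque with pop/drain loops by one flat pass over the list with a
-- scalar 'painted' boundary (objective: simpler). Return values agree on every input.

-- ===== PORT A =====
-- inner while loop: 'while deq and deq[0] < curr + m: deq.popleft()'
def solutionDrain (bound : Int) : List Int → List Int
  | [] => []
  | x :: xs => if x < bound then solutionDrain bound xs else x :: xs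

theorem solutionDrain_length_le (bound : Int) (l : List Int) :
    (solutionDrain bound l).length ≤ l.length := by
  induction l with
  | nil => simp [solutionDrain]
  | cons x xs ih =>
    simp only [solutionDrain]
    split
    · exact Nat.le_succ_of_le ih
    · simp

-- outer while loop over the deque, carrying count
def solutionLoop (m : Int) (deq : List Int) (count : Int) : Int :=
  match deq with
  | [] => count
  | curr :: rest => solutionLoop m (solutionDrain (curr + m) rest) (count + 1)
termination_by deq.length
decreasing_by
  exact Nat.lt_succ_of_le (solutionDrain_length_le _ _)

def solution (n : Int) (m : Int) (section_ : List Int) : Int :=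
  solutionLoop m section_ 0

-- ===== PORT B =====
-- one pass; painted = None until the first stroke
def solutionAltLoop (m : Int) : List Int → Int → Option Int → Int
  | [], count, _ => count
  | x :: xs, count, painted =>
    if (match painted with | none => true | some p => decide (p ≤ x)) then
      solutionAltLoop m xs (count + 1) (some (x + m))
    else
      solutionAltLoop m xs count painted

def solution_alt (n : Int) (m : Int) (section_ : List Int) : Int :=
  solutionAltLoop m section_ 0 none

-- ===== PRECONDITION & SPEC =====
def Spec_solution (n : Int) (m : Int) (section_ : List Int) (out : Int) : Prop := out = solution_alt n m section_
instance (n : Int) (m : Int) (section_ : List Int) (out : Int) : Decidable (Spec_solution n m section_ out) := by unfold Spec_solution; infer_instance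

-- ===== CLAIM (what is proved, stated in full; the proofs are below) =====
def Claim_equal_solution : Prop := ∀ (n : Int) (m : Int) (section_ : List Int), Dom_solution n m section_ → Spec_solution n m section_ (solution n m section_)

-- ===== LEMMAS AND PROOFS =====

-- B running with boundary b equals B restarted (painted = none) on the drained deque
theorem altLoop_some_drain (m b : Int) (l : List Int) (count : Int) :
    solutionAltLoop m l count (some b) =
      solutionAltLoop m (solutionDrain b l) count none := by
  induction l generalizing count with
  | nil => simp [solutionAltLoop, solutionDrain]
  | cons x xs ih =>
    by_cases h : x < b
    · have hb : ¬ b ≤ x := not_le.mpr h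
      simp [solutionAltLoop, solutionDrain, h, hb, ih]
    · have hb : b ≤ x := le_of_not_gt h
      simp [solutionAltLoop, solutionDrain, h, hb]

-- the two loops agree, by strong induction on the deque length
theorem loop_eq (m : Int) (deq : List Int) (count : Int) :
    solutionLoop m deq count = solutionAltLoop m deq count none := by
  induction hn : deq.length using Nat.strong_induction_on generalizing deq count with
  | _ n ih =>
    match deq with
    | [] => simp [solutionLoop, solutionAltLoop]
    | curr :: rest =>
      have hlt : (solutionDrain (curr + m) rest).length < n := by
        have := solutionDrain_length_le (curr + m) rest
        simp at hn
        omega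
      rw [solutionLoop, solutionAltLoop]
      simp only [if_true]
      rw [altLoop_some_drain, ← ih _ hlt _ _ rfl]

-- ===== VERDICT (by name: the statement is the Claim_ definition above) =====
theorem solution_spec : Claim_equal_solution := by
  intro n m section_ _
  unfold Spec_solution solution solution_alt
  exact loop_eq m section_ 0
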